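-- pv_equiv track=rewrite | github.com/VioletCranberry/coco-search | src/cocosearch/deps/extractor.py | _diff_file_hashes
-- ===== SOURCE A (Python) =====
-- def _diff_file_hashes(
--     current: dict[str, tuple[str, str]],
--     stored: dict[str, str],
-- ) -> tuple[set[str], set[str], set[str]]:
--     """Compare current vs stored hashes.
--
--     Args:
--         current: Dict mapping filename to (content_hash, language_id).
--         stored: Dict mapping filename to content_hash.
--
--     Returns:
--         Tuple of (changed_files, added_files, deleted_files).
--     """
--     current_files = set(current.keys())
--     stored_files = set(stored.keys())
--
--     added = current_files - stored_files
--     deleted = stored_files - current_files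
--     changed = {f for f in current_files & stored_files if current[f][0] != stored[f]}
--
--     return changed, added, deleted
-- ===== SOURCE B (Python) =====
-- def _diff_file_hashes(
--     current: dict[str, tuple[str, str]],
--     stored: dict[str, str],
-- ) -> tuple[set[str], set[str], set[str]]:
--     """Consume a working copy of `stored`: one pass over current pops each
--     filename out of the copy (absent -> added, hash mismatch -> changed);
--     whatever survives the pops is exactly the deleted set - no key sets,
--     no set algebra, no membership scan for deleted."""
--     changed: set[str] = set()
--     added: set[str] = set()
--     remaining = dict(stored)
--     for f, (content_hash, _language_id) in current.items():
--         h = remaining.pop(f, None)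
--         if h is None:
--             added.add(f)
--         elif h != content_hash:
--             changed.add(f)
--     return changed, added, set(remaining)
-- ===== Notes on version B (the rewrite author's own statement) =====
-- stated objective: alternative
-- what changed: Instead of building two key sets and taking set differences and an intersection, B consumes a mutable working copy of stored: a single pass over current pops each filename out of the copy (classifying it as added or changed), and the deleted set falls out as the residue of the copy, with no set operations and no membership scan for deleted.
import Mathlib
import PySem

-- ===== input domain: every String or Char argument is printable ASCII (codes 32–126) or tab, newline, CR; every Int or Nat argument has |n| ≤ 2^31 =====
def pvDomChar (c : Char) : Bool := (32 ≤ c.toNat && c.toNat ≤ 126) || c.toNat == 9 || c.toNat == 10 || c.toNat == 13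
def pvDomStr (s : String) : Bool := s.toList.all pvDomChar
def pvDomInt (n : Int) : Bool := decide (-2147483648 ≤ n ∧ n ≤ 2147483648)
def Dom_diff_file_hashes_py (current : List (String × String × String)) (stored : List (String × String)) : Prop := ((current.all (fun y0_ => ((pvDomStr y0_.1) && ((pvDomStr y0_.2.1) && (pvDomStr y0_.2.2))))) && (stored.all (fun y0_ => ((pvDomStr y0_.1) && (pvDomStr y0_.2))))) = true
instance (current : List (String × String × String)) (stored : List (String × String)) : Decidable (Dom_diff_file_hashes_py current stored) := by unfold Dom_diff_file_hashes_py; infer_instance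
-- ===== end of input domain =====

-- B replaces the set algebra by consuming a working copy of stored: one pass over current pops
-- each filename from the copy (added/changed), the residue of the copy is deleted
-- (objective: alternative algorithm; same asymptotic cost).

-- ===== PORT A =====
-- the Python parameters are dicts; under the type convention they arrive as their items lists,
-- so each port views its list parameter as the PySem.Dict whose items it is
def diff_file_hashes_py (current : List (String × String × String)) (stored : List (String × String)) : List String × List String × List String :=
  let cur : PySem.Dict String (String × String) := ⟨current⟩
  let sto : PySem.Dict String String := ⟨stored⟩
  let current_files : PySem.Set String := PySem.Set.ofList cur.keys
  let stored_files : PySem.Set String := PySem.Set.ofList sto.keys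
  let added := PySem.Set.diff current_files stored_files
  let deleted := PySem.Set.diff stored_files current_files
  -- current[f][0] != stored[f]: f lies in both dicts, so both get? are `some`; the
  -- comparison is made on the Option values (exact, since neither lookup can be none here)
  let changed : PySem.Set String := PySem.Set.ofList
    ((PySem.Set.inter current_files stored_files).filter
      (fun f => !((cur.get? f).map (fun p => p.1) == sto.get? f)))
  (changed, added, deleted)

-- ===== PORT B =====
-- remaining = dict(stored); one pass over current.items() pops each file from remaining
-- (pop returning None -> added, popped hash differing -> changed); deleted = set(remaining)
def diff_file_hashes_py_alt (current : List (String × String × String)) (stored : List (String × String)) : List String × List String × List String :=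
  let cur : PySem.Dict String (String × String) := ⟨current⟩
  let acc := cur.items.foldl
    (fun (acc : PySem.Set String × PySem.Set String × PySem.Dict String String) it =>
      match acc.2.2.pop? it.1 with
      | none => (acc.1, PySem.Set.add acc.2.1 it.1, acc.2.2)
      | some (h, rest) =>
        if h != it.2.1 then (PySem.Set.add acc.1 it.1, acc.2.1, rest)
        else (acc.1, acc.2.1, rest))
    (PySem.Set.empty, PySem.Set.empty, (⟨stored⟩ : PySem.Dict String String))
  (acc.1, acc.2.1, PySem.Set.ofList acc.2.2.keys)

-- ===== PRECONDITION & SPEC =====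
-- Pre_ excludes association lists with duplicate filenames: a Python dict cannot hold duplicate
-- keys, so such lists encode no input the Python function is ever called on.
def Pre_diff_file_hashes_py (current : List (String × String × String)) (stored : List (String × String)) : Prop :=
  (current.map (·.1)).Nodup ∧ (stored.map (·.1)).Nodup
instance (current : List (String × String × String)) (stored : List (String × String)) : Decidable (Pre_diff_file_hashes_py current stored) := by unfold Pre_diff_file_hashes_py; infer_instance

def pvWitness_diff_file_hashes_py : (List (String × String × String)) × (List (String × String)) :=
  ([("a.py", "h1", "python"), ("b.py", "h2", "python")], [("a.py", "h0"), ("c.py", "h3")])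

def Spec_diff_file_hashes_py (current : List (String × String × String)) (stored : List (String × String)) (out : List String × List String × List String) : Prop := out = diff_file_hashes_py_alt current stored
instance (current : List (String × String × String)) (stored : List (String × String)) (out : List String × List String × List String) : Decidable (Spec_diff_file_hashes_py current stored out) := by unfold Spec_diff_file_hashes_py; infer_instance

-- ===== CLAIM (what is proved, stated in full; the proofs are below) =====
def Claim_equal_diff_file_hashes_py : Prop := ∀ (current : List (String × String × String)) (stored : List (String × String)), Dom_diff_file_hashes_py current stored → Pre_diff_file_hashes_py current stored → Spec_diff_file_hashes_py current stored (diff_file_hashes_py current stored)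

-- ===== LEMMAS AND PROOFS =====

-- Dict membership read off the key list
theorem pvContainsD {ν : Type} (l : List (String × ν)) (f : String) :
    (PySem.Dict.mk l).contains f = (l.map (·.1)).contains f := by
  simp only [PySem.Dict.contains, List.contains_eq_any_beq, List.any_map]
  simp only [Bool.beq_comm]
  rfl

-- first-match lookup of a key of an item in a duplicate-free association list finds that item
theorem pvFind? {ν : Type} (l : List (String × ν)) (it : String × ν)
    (hnd : (l.map (·.1)).Nodup) (hm : it ∈ l) :
    l.find? (fun p => p.1 == it.1) = some it := by
  induction l with
  | nil => cases hm
  | cons hd tl ih =>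
    simp only [List.map_cons, List.nodup_cons] at hnd
    rcases List.mem_cons.mp hm with h | h
    · subst h; simp
    · have hne : hd.1 ≠ it.1 := by
        intro he
        exact hnd.1 (he ▸ List.mem_map_of_mem h)
      simp [hne, ih hnd.2 h]

theorem pvGet? {ν : Type} (l : List (String × ν)) (it : String × ν)
    (hnd : (l.map (·.1)).Nodup) (hm : it ∈ l) :
    (PySem.Dict.mk l).get? it.1 = some it.2 := by
  simp [PySem.Dict.get?, pvFind? l it hnd hm]

-- find? through a filter that the matching predicate implies
theorem pvFindFilter {α : Type} (l : List α) (p q : α → Bool) (h : ∀ x, p x = true → q x = true) :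
    (l.filter q).find? p = l.find? p := by
  induction l with
  | nil => rfl
  | cons hd tl ih =>
    by_cases hq : q hd = true
    · simp [hq, List.find?_cons, ih]
    · have hp : p hd = false := by
        cases hph : p hd
        · rfl
        · exact absurd (h hd hph) hq
      simp [hq, hp, ih]

-- get? / contains through an erase of a DIFFERENT key are unchanged
theorem pvGetErase {ν : Type} (d : PySem.Dict String ν) (k k' : String) (h : k' ≠ k) :
    (d.erase k).get? k' = d.get? k' := by
  obtain ⟨l⟩ := d
  simp only [PySem.Dict.erase, PySem.Dict.get?]
  rw [pvFindFilter]
  intro x hx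
  have hx' : x.1 = k' := by simpa using hx
  simp [hx', h]

theorem pvContainsErase {ν : Type} (d : PySem.Dict String ν) (k k' : String) (h : k' ≠ k) :
    (d.erase k).contains k' = d.contains k' := by
  rw [PySem.Dict.contains_eq_isSome_get?, PySem.Dict.contains_eq_isSome_get?, pvGetErase d k k' h]

-- a set-add of a fresh element appends
theorem pvAddFresh (s : PySem.Set String) (x : String) (h : x ∉ s) :
    PySem.Set.add s x = s ++ [x] := by
  simp only [PySem.Set.add, PySem.Set.contains]
  simp [h]

-- B's consuming loop over duplicate-free items: closed form of all three components
-- against the dict the loop STARTED from (prior pops never touch a later key)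
theorem pvFoldConsume (l : List (String × String × String))
    (hnd : (l.map (·.1)).Nodup) (c a : List String) (rem : PySem.Dict String String)
    (hc : ∀ it ∈ l, it.1 ∉ c) (ha : ∀ it ∈ l, it.1 ∉ a) :
    l.foldl
      (fun (acc : PySem.Set String × PySem.Set String × PySem.Dict String String) it =>
        match acc.2.2.pop? it.1 with
        | none => (acc.1, PySem.Set.add acc.2.1 it.1, acc.2.2)
        | some (h, rest) =>
          if h != it.2.1 then (PySem.Set.add acc.1 it.1, acc.2.1, rest)
          else (acc.1, acc.2.1, rest)) (c, a, rem)
      = (c ++ (l.filter (fun it => rem.contains it.1 && !(some it.2.1 == rem.get? it.1))).map (·.1),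
         a ++ (l.filter (fun it => !rem.contains it.1)).map (·.1),
         ⟨rem.items.filter (fun p => l.all (fun it => !(p.1 == it.1)))⟩) := by
  induction l generalizing c a rem with
  | nil =>
    simp only [List.foldl_nil, List.filter_nil, List.map_nil, List.append_nil, List.all_nil]
    obtain ⟨li⟩ := rem
    simp
  | cons hd tl ih =>
    simp only [List.map_cons, List.nodup_cons] at hnd
    have hfresh : ∀ it ∈ tl, it.1 ≠ hd.1 := by
      intro it hit he
      exact hnd.1 (he ▸ List.mem_map_of_mem hit)
    have hc' : ∀ it ∈ tl, it.1 ∉ c := fun it hit => hc it (List.mem_cons_of_mem _ hit)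
    have ha' : ∀ it ∈ tl, it.1 ∉ a := fun it hit => ha it (List.mem_cons_of_mem _ hit)
    simp only [List.foldl_cons]
    rcases hg : rem.get? hd.1 with _ | h
    · -- hd.1 absent: pop? = none, key goes to added
      have hcon : rem.contains hd.1 = false := by
        rw [PySem.Dict.contains_eq_isSome_get?, hg]; rfl
      have hpop : rem.pop? hd.1 = none := by simp [PySem.Dict.pop?, hg]
      have ham : hd.1 ∉ a := ha hd (List.mem_cons_self ..)
      simp only [hpop]
      rw [pvAddFresh a hd.1 ham,
        ih hnd.2 c (a ++ [hd.1]) rem hc'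
          (by intro it hit; simp [ha' it hit, hfresh it hit])]
      have hrem : rem.items.filter (fun p => tl.all (fun it => !(p.1 == it.1)))
          = rem.items.filter (fun p => (hd :: tl).all (fun it => !(p.1 == it.1))) := by
        refine List.filter_congr ?_
        intro p hp
        have hpne : p.1 ≠ hd.1 := by
          intro he
          have : rem.contains hd.1 = true := by
            simp only [PySem.Dict.contains]
            exact List.any_eq_true.mpr ⟨p, hp, by simp [he]⟩
          simp [this] at hcon
        simp [List.all_cons, hpne]
      simp [hcon, hrem]
    · -- hd.1 present with stored hash h
      have hcon : rem.contains hd.1 = true := by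
        rw [PySem.Dict.contains_eq_isSome_get?, hg]; rfl
      have hpop : rem.pop? hd.1 = some (h, rem.erase hd.1) := by
        simp [PySem.Dict.pop?, hg]
      simp only [hpop]
      -- the recursive call is against rem.erase hd.1; convert its filters/items back to rem
      have hfc : ∀ (it : String × String × String), it ∈ tl →
          ((rem.erase hd.1).contains it.1 && !(some it.2.1 == (rem.erase hd.1).get? it.1))
            = (rem.contains it.1 && !(some it.2.1 == rem.get? it.1)) := by
        intro it hit
        rw [pvContainsErase rem hd.1 it.1 (hfresh it hit), pvGetErase rem hd.1 it.1 (hfresh it hit)]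
      have hfa : ∀ (it : String × String × String), it ∈ tl →
          (!(rem.erase hd.1).contains it.1) = (!rem.contains it.1) := by
        intro it hit
        rw [pvContainsErase rem hd.1 it.1 (hfresh it hit)]
      have hitems : (rem.erase hd.1).items.filter (fun p => tl.all (fun it => !(p.1 == it.1)))
          = rem.items.filter (fun p => (hd :: tl).all (fun it => !(p.1 == it.1))) := by
        simp only [PySem.Dict.erase, List.filter_filter]
        refine List.filter_congr ?_
        intro p _
        simp only [List.all_cons]
        rw [Bool.and_comm]
      by_cases hne : (h != hd.2.1) = true
      · -- changed file
        have hne' : hd.2.1 ≠ h := by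
          intro he; subst he; simp at hne
        have hcm : hd.1 ∉ c := hc hd (List.mem_cons_self ..)
        rw [if_pos hne, pvAddFresh c hd.1 hcm,
          ih hnd.2 (c ++ [hd.1]) a (rem.erase hd.1)
            (by intro it hit; simp [hc' it hit, hfresh it hit]) ha']
        rw [List.filter_congr hfc, List.filter_congr hfa, hitems]
        simp [hcon, hg, hne']
      · -- unchanged file
        have hne' : h = hd.2.1 := by
          simpa [bne] using hne
        rw [if_neg hne, ih hnd.2 c a (rem.erase hd.1) hc' ha']
        rw [List.filter_congr hfc, List.filter_congr hfa, hitems]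
        simp [hcon, hg, hne']

-- ===== VERDICT (by name: the statement is the Claim_ definition above) =====
theorem diff_file_hashes_py_spec : Claim_equal_diff_file_hashes_py := by
  intro current stored _hdom hpre
  obtain ⟨hnc, hns⟩ := hpre
  unfold Spec_diff_file_hashes_py diff_file_hashes_py diff_file_hashes_py_alt
  simp only [PySem.Dict.keys]
  rw [PySem.Set.ofList_eq_self_of_nodup _ hnc, PySem.Set.ofList_eq_self_of_nodup _ hns]
  rw [pvFoldConsume current hnc PySem.Set.empty PySem.Set.empty ⟨stored⟩
        (by simp [PySem.Set.empty]) (by simp [PySem.Set.empty])]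
  -- changed: A's filtered intersection vs B's changed filter
  have e1 : ((PySem.Set.inter (current.map (·.1)) (stored.map (·.1))).filter
          (fun f => !(((PySem.Dict.mk current).get? f).map (fun p => p.1) == (PySem.Dict.mk stored).get? f)))
      = (current.filter
          (fun it => (PySem.Dict.mk stored).contains it.1
            && !(some it.2.1 == (PySem.Dict.mk stored).get? it.1))).map (·.1) := by
    simp only [PySem.Set.inter, PySem.Set.contains]
    rw [List.filter_filter, List.filter_map]
    refine congrArg (List.map _) (List.filter_congr ?_)
    intro it hit
    simp only [Function.comp_apply, pvGet? current it hnc hit, pvContainsD, Option.map_some]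
    rw [Bool.and_comm]
  -- added: A's Set.diff vs B's added filter
  have e2 : PySem.Set.diff (current.map (·.1)) (stored.map (·.1))
      = (current.filter (fun it => !(PySem.Dict.mk stored).contains it.1)).map (·.1) := by
    simp only [PySem.Set.diff, PySem.Set.contains]
    rw [List.filter_map]
    refine congrArg (List.map _) (List.filter_congr ?_)
    intro it _
    simp only [Function.comp_apply, pvContainsD]
  -- deleted: A's Set.diff vs the keys of the consumed copy's residue
  have e3 : PySem.Set.diff (stored.map (·.1)) (current.map (·.1))
      = PySem.Set.ofList (PySem.Dict.keys
          ⟨(PySem.Dict.mk stored).items.filter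
            (fun p => current.all (fun it => !(p.1 == it.1)))⟩) := by
    simp only [PySem.Dict.keys]
    have hk : ((stored.filter (fun p => current.all (fun it => !(p.1 == it.1)))).map (·.1))
        = (stored.map (·.1)).filter (fun f => current.all (fun it => !(f == it.1))) := by
      rw [List.filter_map]; rfl
    rw [hk, PySem.Set.ofList_eq_self_of_nodup _ (hns.filter _)]
    simp only [PySem.Set.diff, PySem.Set.contains]
    refine List.filter_congr ?_
    intro f _
    rw [List.contains_eq_any_beq]
    simp [List.all_eq_not_any_not, Function.comp_def]
  rw [e1, e2, e3]
  -- A's changed comes wrapped in the comprehension's set(); its argument is duplicate-free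
  rw [PySem.Set.ofList_eq_self_of_nodup _
      (List.Nodup.sublist (List.Sublist.map _ List.filter_sublist) hnc)]
  simp [PySem.Set.empty]
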